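-- pv_equiv track=rewrite | github.com/MagataShikiFFFF/PPI-predictor-Protein-complex-detector | n-gram/go_func_level_reader.py | dic_fun_level
-- ===== SOURCE A (Python) =====
-- def dic_fun_level(x):
-- 	d = {}
-- 	for i in range(len(x)):
-- 		if x[i][-1]=='Level':
-- 			lev = 0
-- 		else:
-- 			lev = int(x[i][-1].strip('Level'))
--
-- 		if lev not in d.keys():
-- 			d[lev] = []
-- 		d[lev].append(x[i][0])
--
-- 	go = []
-- 	for key in sorted(d.keys()):
-- 		print (str(key) +": "+ str(len(d[key])))
-- 		for j in d[key]:
-- 			go.append(j)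
--
-- 	return d, go
-- ===== SOURCE B (Python) =====
-- def _level(s):
--     return 0 if s == 'Level' else int(s.strip('Level'))
--
--
-- def dic_fun_level(x):
--     # One pass to key every row, then a stable sort of the flat keyed list
--     # builds `go` directly (no sorted-keys + nested inner loop).
--     keyed = [(_level(r[-1]), r[0]) for r in x]
--     d = {}
--     for k, v in keyed:
--         d[k] = d.get(k, []) + [v]
--     for k in sorted(d):
--         print(str(k) + ": " + str(len(d[k])))
--     go = [v for _, v in sorted(keyed, key=lambda p: p[0])]
--     return d, go
-- ===== Notes on version B (the rewrite author's own statement) =====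
-- stated objective: alternative
-- what changed: go is built by one stable sort of the flat (level, name) list instead of iterating d[key] for each sorted dict key, and the grouping pass folds precomputed keyed pairs with d.get-concat instead of the membership-test branch over indices.
import Mathlib
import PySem

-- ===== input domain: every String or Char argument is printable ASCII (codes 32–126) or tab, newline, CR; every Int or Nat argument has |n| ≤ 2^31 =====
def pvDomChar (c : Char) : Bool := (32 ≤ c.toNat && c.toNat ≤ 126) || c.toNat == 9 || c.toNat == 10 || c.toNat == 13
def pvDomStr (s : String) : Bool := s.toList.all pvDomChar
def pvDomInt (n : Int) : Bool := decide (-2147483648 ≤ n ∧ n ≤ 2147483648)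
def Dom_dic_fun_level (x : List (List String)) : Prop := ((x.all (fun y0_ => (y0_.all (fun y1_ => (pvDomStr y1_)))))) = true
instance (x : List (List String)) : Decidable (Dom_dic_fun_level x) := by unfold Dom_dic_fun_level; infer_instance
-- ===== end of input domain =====

-- B builds `go` by one stable sort of the flat (level, name) list instead of A's
-- sorted-keys-plus-nested-inner-loop; equivalence of the RETURN value is proved
-- (the Python prints are not modelled).

-- ===== PORT A =====
def dic_fun_level (x : List (List String)) : (List (Int × List String)) × List String :=
  let d := (PySem.List.pyRange 0 (PySem.List.len x)).foldl
    (fun d i =>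
      let row := PySem.List.pyGetD x i ([] : List String)
      let last := (PySem.List.pyGet? row (-1)).getD ""          -- x[i][-1]; Pre_ keeps the row nonempty
      let lev : Int := if last == "Level" then 0
        else (PySem.Int.ofStr? (PySem.Str.stripChars last "Level")).getD 0   -- int(...); Pre_ keeps it parseable
      let d := if d.contains lev then d else d.insert lev ([] : List String)
      d.modify lev [] (fun g => g ++ [(PySem.List.pyGet? row 0).getD ""]))
    PySem.Dict.empty
  let go := (PySem.List.sorted d.keys (fun k => k)).foldl
    (fun go k => (d.getD k []).foldl (fun go j => go ++ [j]) go) []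
  (d.items, go)

-- ===== PORT B =====
def pvLevel (s : String) : Int :=
  if s == "Level" then 0
  else (PySem.Int.ofStr? (PySem.Str.stripChars s "Level")).getD 0   -- Pre_ keeps int() from raising

def dic_fun_level_alt (x : List (List String)) : (List (Int × List String)) × List String :=
  let keyed := x.map (fun r =>
    (pvLevel ((PySem.List.pyGet? r (-1)).getD ""), (PySem.List.pyGet? r 0).getD ""))
  let d := keyed.foldl
    (fun d p => d.modify p.1 ([] : List String) (fun g => g ++ [p.2])) PySem.Dict.empty
  let go := (PySem.List.sorted keyed (fun p => p.1)).map (fun p => p.2)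
  (d.items, go)

-- ===== PRECONDITION & SPEC =====
-- Pre_ excludes exactly the inputs on which the Python A raises: a row that is
-- empty (IndexError on x[i][-1]) or whose last entry is neither 'Level' nor an
-- int()-parseable string after .strip('Level') (ValueError).
def Pre_dic_fun_level (x : List (List String)) : Prop :=
  ∀ r ∈ x, r ≠ [] ∧
    (((PySem.List.pyGet? r (-1)).getD "") = "Level" ∨
     (PySem.Int.ofStr? (PySem.Str.stripChars ((PySem.List.pyGet? r (-1)).getD "") "Level")).isSome = true)
instance (x : List (List String)) : Decidable (Pre_dic_fun_level x) := by
  unfold Pre_dic_fun_level; infer_instance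

def pvWitness_dic_fun_level : List (List String) :=
  [["f1", "Level"], ["f2", "a", "Level2"], ["f3", " 7 "]]

def Spec_dic_fun_level (x : List (List String)) (out : (List (Int × List String)) × List String) : Prop := out = dic_fun_level_alt x
instance (x : List (List String)) (out : (List (Int × List String)) × List String) : Decidable (Spec_dic_fun_level x out) := by unfold Spec_dic_fun_level; infer_instance

-- ===== CLAIM (what is proved, stated in full; the proofs are below) =====
def Claim_equal_dic_fun_level : Prop := ∀ (x : List (List String)), Dom_dic_fun_level x → Pre_dic_fun_level x → Spec_dic_fun_level x (dic_fun_level x)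

-- ===== LEMMAS AND PROOFS =====

-- the (level, first-element) pair B computes for a row
def pvPair (r : List String) : Int × String :=
  (pvLevel ((PySem.List.pyGet? r (-1)).getD ""), (PySem.List.pyGet? r 0).getD "")

-- the grouped flat list: for each key of ks in order, the elements of l with that key
def pvCanon (ks : List Int) (l : List (Int × String)) : List (Int × String) :=
  ks.flatMap (fun k => l.filter (fun p => p.1 == k))

theorem pvCanon_nil (ks : List Int) : pvCanon ks [] = [] := by
  simp [pvCanon]

theorem pvCanon_append_not_mem (ks : List Int) (l : List (Int × String)) (p : Int × String)
    (h : ∀ k ∈ ks, p.1 ≠ k) : pvCanon ks (l ++ [p]) = pvCanon ks l := by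
  induction ks with
  | nil => simp [pvCanon]
  | cons k ks ih =>
      have hk : p.1 ≠ k := h k (by simp)
      simp only [pvCanon, List.flatMap_cons] at *
      rw [List.filter_append]
      have hbk : (p.1 == k) = false := beq_eq_false_iff_ne.mpr hk
      have : List.filter (fun q => q.1 == k) [p] = [] := by
        simp [List.filter, hbk]
      rw [this, List.append_nil, ih (fun k' hk' => h k' (by simp [hk']))]

theorem pvKey_mem_canon (ks : List Int) (l : List (Int × String)) (q : Int × String)
    (h : q ∈ pvCanon ks l) : q.1 ∈ ks := by
  simp only [pvCanon, List.mem_flatMap, List.mem_filter] at h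
  obtain ⟨k, hk, _, he⟩ := h
  simpa [beq_iff_eq.mp he] using hk

theorem pvInsertBy_append_left (before : Int × String → Int × String → Bool)
    (p : Int × String) (as bs : List (Int × String)) (h : ∀ a ∈ as, before p a = false) :
    PySem.List.insertBy before p (as ++ bs) = as ++ PySem.List.insertBy before p bs := by
  induction as with
  | nil => simp
  | cons a as ih =>
      have ha : before p a = false := h a (by simp)
      simp only [List.cons_append, PySem.List.insertBy, ha]
      simp [ih (fun a' ha' => h a' (by simp [ha']))]

theorem pvCanon_cons (k : Int) (ks : List Int) (l : List (Int × String)) :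
    pvCanon (k :: ks) l = l.filter (fun p => p.1 == k) ++ pvCanon ks l := rfl

theorem pvInsertBy_canon (ks : List Int) (l : List (Int × String)) (p : Int × String)
    (hps : ks.Pairwise (· < ·)) (hmem : p.1 ∈ ks) :
    PySem.List.insertBy (fun a b => decide (a.1 < b.1)) p (pvCanon ks l) = pvCanon ks (l ++ [p]) := by
  induction ks with
  | nil => simp at hmem
  | cons k ks ih =>
      have hlt : ∀ k' ∈ ks, k < k' := (List.pairwise_cons.mp hps).1
      have hps' : ks.Pairwise (· < ·) := (List.pairwise_cons.mp hps).2
      rw [pvCanon_cons, pvCanon_cons]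
      have hskip : ∀ a ∈ List.filter (fun q => q.1 == k) l,
          (fun a b => decide (a.1 < b.1)) p a = false := by
        intro a ha
        have hak : a.1 = k := beq_iff_eq.mp (List.mem_filter.mp ha).2
        by_cases hp : p.1 = k
        · simp [hak, hp]
        · have hpk : p.1 ∈ ks := by
            rcases List.mem_cons.mp hmem with h | h
            · exact absurd h hp
            · exact h
          have : k < p.1 := hlt _ hpk
          simp [hak]; omega
      rw [pvInsertBy_append_left _ _ _ _ hskip]
      by_cases hp : p.1 = k
      · -- p joins the first group; later groups are unchanged
        have hnot : ∀ k' ∈ ks, p.1 ≠ k' := by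
          intro k' hk'; have := hlt _ hk'; omega
        rw [pvCanon_append_not_mem ks l p hnot, List.filter_append]
        have hone : List.filter (fun q => q.1 == k) [p] = [p] := by
          simp [List.filter, beq_iff_eq.mpr hp]
        rw [hone]
        cases hc : pvCanon ks l with
        | nil => simp [PySem.List.insertBy]
        | cons q t =>
            have hq : q.1 ∈ ks := pvKey_mem_canon ks l q (by rw [hc]; simp)
            have hlt' : (p.1 < q.1) = True := by
              have := hlt _ hq; simp; omega
            simp only [PySem.List.insertBy, hlt', decide_true]
            simp
      · have hpk : p.1 ∈ ks := by
          rcases List.mem_cons.mp hmem with h | h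
          · exact absurd h hp
          · exact h
        rw [ih hps' hpk, List.filter_append]
        have hz : List.filter (fun q => q.1 == k) [p] = [] := by
          simp [List.filter, beq_eq_false_iff_ne.mpr hp]
        rw [hz, List.append_nil]

theorem pvSorted_eq_canon (ks : List Int) (l : List (Int × String))
    (hps : ks.Pairwise (· < ·)) (hcov : ∀ p ∈ l, p.1 ∈ ks) :
    PySem.List.sorted l (fun p => p.1) = pvCanon ks l := by
  induction l using List.reverseRecOn with
  | nil => simp [PySem.List.sorted_eq_foldl_insertBy, pvCanon_nil]
  | append_singleton l p ih =>
      rw [PySem.List.sorted_eq_foldl_insertBy, List.foldl_append,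
        ← PySem.List.sorted_eq_foldl_insertBy]
      simp only [List.foldl_cons, List.foldl_nil]
      rw [ih (fun q hq => hcov q (by simp [hq]))]
      exact pvInsertBy_canon ks l p hps (hcov p (by simp))

-- A's dict-building step equals B's: the membership-test branch is absorbed by modify
theorem pvStep_eq (d : PySem.Dict Int (List String)) (k : Int) (v : String) :
    (if d.contains k then d else d.insert k ([] : List String)).modify k [] (fun g => g ++ [v]) =
      d.modify k [] (fun g => g ++ [v]) := by
  by_cases h : d.contains k = true
  · simp [h]
  · have h' : d.contains k = false := by simpa using h
    rw [if_neg (by simp [h'])]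
    simp [PySem.Dict.modify, PySem.Dict.getD_insert_self, PySem.Dict.insert_insert_self,
      PySem.Dict.getD_of_not_contains d ([] : List String) h']

-- proof-only names for the two folds
def pvStepA (d : PySem.Dict Int (List String)) (row : List String) :
    PySem.Dict Int (List String) :=
  let last := (PySem.List.pyGet? row (-1)).getD ""
  let lev : Int := if last == "Level" then 0
    else (PySem.Int.ofStr? (PySem.Str.stripChars last "Level")).getD 0
  let d := if d.contains lev then d else d.insert lev ([] : List String)
  d.modify lev [] (fun g => g ++ [(PySem.List.pyGet? row 0).getD ""])

def pvStepB (d : PySem.Dict Int (List String)) (p : Int × String) :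
    PySem.Dict Int (List String) :=
  d.modify p.1 ([] : List String) (fun g => g ++ [p.2])

def pvKeyed (x : List (List String)) : List (Int × String) := x.map pvPair

def pvDictA (x : List (List String)) : PySem.Dict Int (List String) :=
  (PySem.List.pyRange 0 (PySem.List.len x)).foldl
    (fun d i => pvStepA d (PySem.List.pyGetD x i ([] : List String))) PySem.Dict.empty

def pvDictB (x : List (List String)) : PySem.Dict Int (List String) :=
  (pvKeyed x).foldl pvStepB PySem.Dict.empty

theorem pvDictA_eq (x : List (List String)) : pvDictA x = pvDictB x := by
  unfold pvDictA pvDictB pvKeyed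
  rw [PySem.List.foldl_pyRange_pyGetD x ([] : List String) pvStepA PySem.Dict.empty (le_refl 0)]
  rw [List.foldl_map]
  have hstep : (fun (d : PySem.Dict Int (List String)) (r : List String) =>
      pvStepB d (pvPair r)) = pvStepA := by
    funext d r
    exact (pvStep_eq d (pvPair r).1 (pvPair r).2).symm
  rw [hstep]
  norm_num

theorem pvKeys_nodup (x : List (List String)) : (pvDictB x).keys.Nodup := by
  exact PySem.Dict.nodup_keys_foldl_modify_key (pvKeyed x) (fun p => p.1) ([] : List String)
    (fun _ p => fun g => g ++ [p.2]) PySem.Dict.empty (by exact PySem.Dict.nodup_keys_empty)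

theorem pvMem_keys (x : List (List String)) (p : Int × String) (hp : p ∈ pvKeyed x) :
    p.1 ∈ (pvDictB x).keys := by
  have hkeys := PySem.Dict.keys_foldl_modify_key (pvKeyed x) (fun p => p.1) ([] : List String)
    (fun _ p => fun g => g ++ [p.2]) PySem.Dict.empty
  rw [PySem.Dict.keys_empty] at hkeys
  rw [show pvDictB x = (pvKeyed x).foldl
      (fun d p => d.modify p.1 ([] : List String) (fun g => g ++ [p.2])) PySem.Dict.empty from rfl,
    hkeys]
  exact (PySem.Set.mem_update [] _ p.1).mpr (Or.inr (List.mem_map.mpr ⟨p, hp, rfl⟩))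

theorem pvGetD_eq (x : List (List String)) (c : Int) :
    (pvDictB x).getD c [] = ((pvKeyed x).filter (fun p => p.1 == c)).map (fun p => p.2) := by
  have h := PySem.Dict.getD_foldl_modify_append (pvKeyed x) PySem.Dict.empty c
  rw [PySem.Dict.getD_empty, List.nil_append] at h
  exact h

theorem pvSkeys_pairwise (x : List (List String)) :
    (PySem.List.sorted (pvDictB x).keys (fun k => k)).Pairwise (· < ·) := by
  have hle := PySem.List.sorted_pairwise (pvDictB x).keys (fun k => k)
  have hnd : (PySem.List.sorted (pvDictB x).keys (fun k => k)).Nodup :=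
    (PySem.List.sorted_perm (pvDictB x).keys (fun k => k) false).symm.nodup (pvKeys_nodup x)
  exact (hle.and hnd).imp (fun h => lt_of_le_of_ne h.1 h.2)

theorem pvMain (x : List (List String)) : dic_fun_level x = dic_fun_level_alt x := by
  have hA : dic_fun_level x = ((pvDictA x).items,
      (PySem.List.sorted (pvDictA x).keys (fun k => k)).foldl
        (fun go k => ((pvDictA x).getD k []).foldl (fun go j => go ++ [j]) go) []) := rfl
  have hB : dic_fun_level_alt x = ((pvDictB x).items,
      (PySem.List.sorted (pvKeyed x) (fun p => p.1)).map (fun p => p.2)) := rfl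
  rw [hA, hB, pvDictA_eq x]
  have hcov : ∀ p ∈ pvKeyed x, p.1 ∈ PySem.List.sorted (pvDictB x).keys (fun k => k) := by
    intro p hp
    rw [PySem.List.mem_sorted]
    exact pvMem_keys x p hp
  refine Prod.ext rfl ?_
  show (PySem.List.sorted (pvDictB x).keys (fun k => k)).foldl
      (fun go k => ((pvDictB x).getD k []).foldl (fun go j => go ++ [j]) go) [] =
    (PySem.List.sorted (pvKeyed x) (fun p => p.1)).map (fun p => p.2)
  rw [pvSorted_eq_canon _ _ (pvSkeys_pairwise x) hcov]
  simp only [PySem.List.foldl_append_singleton_eq_self]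
  rw [PySem.List.foldl_append_eq_flatMap (fun k => (pvDictB x).getD k [])
    (PySem.List.sorted (pvDictB x).keys (fun k => k)) []]
  simp only [List.nil_append, pvCanon, List.map_flatMap]
  exact List.flatMap_congr (fun k _ => pvGetD_eq x k)

-- ===== VERDICT (by name: the statement is the Claim_ definition above) =====
theorem dic_fun_level_spec : Claim_equal_dic_fun_level := by
  intro x _ _
  exact pvMain x
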